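-- pv_equiv track=rewrite | github.com/CarlosCaPe/FP | SQLRefactoring/tools/scripts/analyze_fcts_explain.py | _parse_brace_kv
-- ===== SOURCE A (Python) =====
-- def _int_or_none(s: str | None) -> int | None:
--     if s is None:
--         return None
--     s = s.strip()
--     if not s:
--         return None
--     try:
--         return int(s)
--     except ValueError:
--         return None
--
-- def _parse_brace_kv(brace: str) -> dict[str, int | None]:
--     out: dict[str, int | None] = {
--         "partitionsTotal": None,
--         "partitionsAssigned": None,
--         "bytesAssigned": None,
--     }
--     for part in brace.split(","):
--         if "=" not in part:
--             continue
--         k, v = part.split("=", 1)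
--         k = k.strip()
--         v = v.strip()
--         if k in out:
--             out[k] = _int_or_none(v)
--     return out
-- ===== SOURCE B (Python) =====
-- def _int_or_none(s):
--     if s is None:
--         return None
--     s = s.strip()
--     if not s:
--         return None
--     try:
--         return int(s)
--     except ValueError:
--         return None
--
--
-- def _parse_brace_kv(brace):
--     # No table at all: for each of the three fixed fields, scan the comma
--     # parts BACK-TO-FRONT and take the first '='-part whose stripped key
--     # matches (= the last one in A's left-to-right, last-wins update).
--     parts = brace.split(",")
--
--     def _last_value(name):
--         for part in reversed(parts):
--             if "=" in part:
--                 k, v = part.split("=", 1)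
--                 if k.strip() == name:
--                     return _int_or_none(v.strip())
--         return None
--
--     return {name: _last_value(name)
--             for name in ("partitionsTotal", "partitionsAssigned", "bytesAssigned")}
-- ===== Notes on version B (the rewrite author's own statement) =====
-- stated objective: alternative
-- what changed: A makes one forward pass over the comma parts updating a pre-initialised dict with a membership gate (last write wins); B keeps no dict at all and instead, for each of the three fixed field names, scans the comma parts in reverse and returns the parsed value of the first part whose stripped key matches, so the last-wins rule becomes first-match on the reversed list.
import Mathlib
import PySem

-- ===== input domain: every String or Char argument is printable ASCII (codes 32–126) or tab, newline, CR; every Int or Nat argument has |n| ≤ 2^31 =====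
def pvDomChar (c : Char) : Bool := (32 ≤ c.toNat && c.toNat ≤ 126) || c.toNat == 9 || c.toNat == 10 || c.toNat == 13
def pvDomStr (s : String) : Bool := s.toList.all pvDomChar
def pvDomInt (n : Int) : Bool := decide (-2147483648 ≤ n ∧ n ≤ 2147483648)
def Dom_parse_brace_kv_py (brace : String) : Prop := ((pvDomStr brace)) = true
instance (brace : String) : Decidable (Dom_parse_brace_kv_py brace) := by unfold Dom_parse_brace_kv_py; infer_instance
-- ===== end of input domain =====

-- B keeps no dict: for each of the three fixed field names it scans the comma parts in
-- reverse and takes the first matching '='-part, replacing A's last-wins dict updates (alternative).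

-- ===== PORT A =====
-- _int_or_none, shared helper of both modules (Source B contains the identical function)
def intOrNone (s : Option String) : Option Int :=
  match s with
  | none => none
  | some s =>
    let s := PySem.Str.strip s
    if s = "" then none
    else PySem.Int.ofStr? s   -- int(s) with ValueError → None

-- body of A's single for-loop over the comma parts
def pvStepA (out : PySem.Dict String (Option Int)) (part : String) : PySem.Dict String (Option Int) :=
  if PySem.Str.isIn "=" part then
    match PySem.Str.splitMax? part "=" 1 with
    | some [k, v] =>
      let k := PySem.Str.strip k
      let v := PySem.Str.strip v
      if out.contains k then out.insert k (intOrNone (some v)) else out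
    | _ => out   -- unreachable: with "=" in part, part.split("=", 1) yields exactly two pieces
  else out

def parse_brace_kv_py (brace : String) : List (String × Option Int) :=
  let out0 : PySem.Dict String (Option Int) :=
    ((PySem.Dict.empty.insert "partitionsTotal" none).insert "partitionsAssigned" none).insert "bytesAssigned" none
  (((PySem.Str.split? brace ",").getD []).foldl pvStepA out0).items

-- ===== PORT B =====
-- B's inner loop `_last_value`: first match over the REVERSED part list (caller reverses)
def pvLastValue (name : String) : List String → Option Int
  | [] => none
  | part :: rest =>
    if PySem.Str.isIn "=" part then
      match PySem.Str.splitMax? part "=" 1 with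
      | some [k, v] =>
        if PySem.Str.strip k = name then intOrNone (some (PySem.Str.strip v))
        else pvLastValue name rest
      | _ => pvLastValue name rest   -- unreachable, as above
    else pvLastValue name rest

def parse_brace_kv_py_alt (brace : String) : List (String × Option Int) :=
  let parts := (PySem.Str.split? brace ",").getD []
  ["partitionsTotal", "partitionsAssigned", "bytesAssigned"].map
    (fun name => (name, pvLastValue name parts.reverse))

-- ===== PRECONDITION & SPEC =====
def Spec_parse_brace_kv_py (brace : String) (out : List (String × Option Int)) : Prop := out = parse_brace_kv_py_alt brace
instance (brace : String) (out : List (String × Option Int)) : Decidable (Spec_parse_brace_kv_py brace out) := by unfold Spec_parse_brace_kv_py; infer_instance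

-- ===== CLAIM (what is proved, stated in full; the proofs are below) =====
def Claim_equal_parse_brace_kv_py : Prop := ∀ (brace : String), Dom_parse_brace_kv_py brace → Spec_parse_brace_kv_py brace (parse_brace_kv_py brace)

-- ===== LEMMAS AND PROOFS =====

-- A's running dict as a function of the three slot values (the loop invariant's shape)
def pvMkA (f1 f2 f3 : Option Int) : PySem.Dict String (Option Int) :=
  PySem.Dict.mk [("partitionsTotal", f1), ("partitionsAssigned", f2), ("bytesAssigned", f3)]

-- the membership-gated insert updates exactly the matching slot of pvMkA
lemma pvInsert3 (f1 f2 f3 : Option Int) (K : String) (x : Option Int) :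
    (if (pvMkA f1 f2 f3).contains K then (pvMkA f1 f2 f3).insert K x else pvMkA f1 f2 f3)
      = pvMkA (if K = "partitionsTotal" then x else f1)
              (if K = "partitionsAssigned" then x else f2)
              (if K = "bytesAssigned" then x else f3) := by
  by_cases h1 : K = "partitionsTotal"
  · subst h1
    have hc : (pvMkA f1 f2 f3).contains "partitionsTotal" = true := by
      simp [pvMkA, PySem.Dict.contains_mk]
    rw [if_pos hc]
    apply PySem.Dict.ext
    rw [PySem.Dict.items_insert_of_contains _ _ hc]
    simp [pvMkA]
  · by_cases h2 : K = "partitionsAssigned"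
    · subst h2
      have hc : (pvMkA f1 f2 f3).contains "partitionsAssigned" = true := by
        simp [pvMkA, PySem.Dict.contains_mk]
      rw [if_pos hc]
      apply PySem.Dict.ext
      rw [PySem.Dict.items_insert_of_contains _ _ hc]
      simp [pvMkA]
    · by_cases h3 : K = "bytesAssigned"
      · subst h3
        have hc : (pvMkA f1 f2 f3).contains "bytesAssigned" = true := by
          simp [pvMkA, PySem.Dict.contains_mk]
        rw [if_pos hc]
        apply PySem.Dict.ext
        rw [PySem.Dict.items_insert_of_contains _ _ hc]
        simp [pvMkA]
      · have hc : (pvMkA f1 f2 f3).contains K = false := by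
          simp [pvMkA, PySem.Dict.contains_mk]
          exact ⟨fun h => h1 h.symm, fun h => h2 h.symm, fun h => h3 h.symm⟩
        rw [if_neg (by simp [hc]), if_neg h1, if_neg h2, if_neg h3]

-- pvLastValue over (l ++ [p]).reverse examines p first
lemma pvLast_snoc (name : String) (l : List String) (p : String) :
    pvLastValue name (l ++ [p]).reverse = pvLastValue name (p :: l.reverse) := by
  simp

-- one loop step of A, expressed on B's reverse-scan results
lemma pvStep_last (rest : List String) (p : String) :
    pvStepA (pvMkA (pvLastValue "partitionsTotal" rest)
                   (pvLastValue "partitionsAssigned" rest)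
                   (pvLastValue "bytesAssigned" rest)) p
      = pvMkA (pvLastValue "partitionsTotal" (p :: rest))
              (pvLastValue "partitionsAssigned" (p :: rest))
              (pvLastValue "bytesAssigned" (p :: rest)) := by
  by_cases hg : PySem.Str.isIn "=" p = true
  · cases h : PySem.Str.splitMax? p "=" 1 with
    | none => simp only [pvStepA, pvLastValue, hg, h, if_true]
    | some ws =>
      match ws with
      | [] => simp only [pvStepA, pvLastValue, hg, h, if_true]
      | [_] => simp only [pvStepA, pvLastValue, hg, h, if_true]
      | _ :: _ :: _ :: _ => simp only [pvStepA, pvLastValue, hg, h, if_true]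
      | [k, v] =>
        simp only [pvStepA, pvLastValue, hg, h, if_true]
        rw [pvInsert3]
  · simp only [pvStepA, pvLastValue, if_neg hg]

-- the loop invariant: A's fold over a prefix equals pvMkA of B's reverse-scan results
lemma pvFold_inv (parts : List String) :
    parts.foldl pvStepA (pvMkA none none none)
      = pvMkA (pvLastValue "partitionsTotal" parts.reverse)
              (pvLastValue "partitionsAssigned" parts.reverse)
              (pvLastValue "bytesAssigned" parts.reverse) := by
  induction parts using List.reverseRecOn with
  | nil => rfl
  | append_singleton l p ih =>
    rw [List.foldl_append, List.foldl_cons, List.foldl_nil, ih,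
        pvLast_snoc, pvLast_snoc, pvLast_snoc]
    exact pvStep_last l.reverse p

-- ===== VERDICT (by name: the statement is the Claim_ definition above) =====
theorem parse_brace_kv_py_spec : Claim_equal_parse_brace_kv_py := by
  intro brace _
  unfold Spec_parse_brace_kv_py parse_brace_kv_py parse_brace_kv_py_alt
  dsimp only
  have h0 : ((((PySem.Dict.empty.insert "partitionsTotal" none).insert "partitionsAssigned" none).insert "bytesAssigned" none) : PySem.Dict String (Option Int)) = pvMkA none none none := by decide
  rw [h0, pvFold_inv]
  rfl
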